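-- pv_equiv track=rewrite | github.com/liuxsh9/sft-label | src/sft_label/preprocessing.py | _merge_tiny_segments
-- ===== SOURCE A (Python) =====
-- def _merge_tiny_segments(segments, min_segment_size):
--     if len(segments) <= 1:
--         return segments
--
--     merged = []
--     for segment in segments:
--         if merged and len(segment) < min_segment_size:
--             merged[-1].extend(segment)
--             continue
--         merged.append(list(segment))
--
--     if len(merged) > 1 and len(merged[0]) < min_segment_size:
--         merged[1] = merged[0] + merged[1]
--         merged = merged[1:]
--
--     return merged
-- ===== SOURCE B (Python) =====
-- def _merge_tiny_segments(segments, min_segment_size):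
--     if len(segments) <= 1:
--         return segments
--
--     groups = []
--     rest = segments
--     while rest:
--         k = 1
--         while k < len(rest) and len(rest[k]) < min_segment_size:
--             k += 1
--         groups.append([x for seg in rest[:k] for x in seg])
--         rest = rest[k:]
--
--     if len(groups) > 1 and len(groups[0]) < min_segment_size:
--         groups[1] = groups[0] + groups[1]
--         groups = groups[1:]
--
--     return groups
-- ===== Notes on version B (the rewrite author's own statement) =====
-- stated objective: alternative
-- what changed: A mutates a growing 'merged' list, extending its last element per tiny segment; B scans for each group the run of following tiny segments and flattens that slice in one step, never mutating intermediates.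
import Mathlib
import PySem

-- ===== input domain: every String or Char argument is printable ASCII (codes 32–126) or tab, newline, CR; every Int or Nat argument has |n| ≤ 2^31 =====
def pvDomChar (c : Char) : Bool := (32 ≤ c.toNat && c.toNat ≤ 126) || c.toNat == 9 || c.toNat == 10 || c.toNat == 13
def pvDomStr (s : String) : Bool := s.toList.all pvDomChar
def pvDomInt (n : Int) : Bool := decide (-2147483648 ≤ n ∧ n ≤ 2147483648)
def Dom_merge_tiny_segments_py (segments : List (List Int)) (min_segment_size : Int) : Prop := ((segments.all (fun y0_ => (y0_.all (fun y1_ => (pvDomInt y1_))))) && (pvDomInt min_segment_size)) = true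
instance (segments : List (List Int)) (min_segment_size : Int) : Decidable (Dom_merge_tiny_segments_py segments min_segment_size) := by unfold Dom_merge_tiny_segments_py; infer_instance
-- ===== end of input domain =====

-- B groups the segments by scanning runs of tiny segments with slices instead of mutating a growing
-- list in place; objective: alternative decomposition (same cost), no mutation of intermediates.


-- ===== PORT A =====
-- loop body of A: 'if merged and len(segment) < min: merged[-1].extend(segment) else merged.append(list(segment))'
def pvStepA (min_segment_size : Int) (m : List (List Int)) (segment : List Int) : List (List Int) :=
  if m ≠ [] ∧ (segment.length : Int) < min_segment_size then
    m.dropLast ++ [m.getLastD [] ++ segment]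
  else
    m ++ [segment]

def merge_tiny_segments_py (segments : List (List Int)) (min_segment_size : Int) : List (List Int) :=
  if segments.length ≤ 1 then segments
  else
    let merged := segments.foldl (pvStepA min_segment_size) []
    -- 'if len(merged) > 1 and len(merged[0]) < min: merged[1] = merged[0] + merged[1]; merged = merged[1:]'
    match merged with
    | g0 :: g1 :: rest =>
        if (g0.length : Int) < min_segment_size then (g0 ++ g1) :: rest else g0 :: g1 :: rest
    | m => m

-- ===== PORT B =====
-- inner while loop of B: k = 1; while k < len(rest) and len(rest[k]) < min: k += 1
-- (pvTinyRun counts the tiny prefix of rest[1:], so k = 1 + pvTinyRun … rest.tail)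
def pvTinyRun (min_segment_size : Int) : List (List Int) → Nat
  | [] => 0
  | t :: rest => if (t.length : Int) < min_segment_size then pvTinyRun min_segment_size rest + 1 else 0

-- outer while loop of B: flatten rest[:k] into one group, continue on rest[k:]
def pvGroupsB (min_segment_size : Int) : List (List Int) → List (List Int)
  | [] => []
  | s :: tail =>
      let k := 1 + pvTinyRun min_segment_size tail
      ((s :: tail).take k).flatMap (fun seg => seg) ::
        pvGroupsB min_segment_size ((s :: tail).drop k)
termination_by l => l.length
decreasing_by simp

def merge_tiny_segments_py_alt (segments : List (List Int)) (min_segment_size : Int) : List (List Int) :=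
  if segments.length ≤ 1 then segments
  else
    let groups := pvGroupsB min_segment_size segments
    -- 'if len(groups) > 1 and len(groups[0]) < min: groups[1] = groups[0] + groups[1]; groups = groups[1:]'
    if 1 < groups.length ∧ ((groups.headD []).length : Int) < min_segment_size then
      ((groups.headD []) ++ ((groups.drop 1).headD [])) :: groups.drop 2
    else groups

-- ===== PRECONDITION & SPEC =====
def Spec_merge_tiny_segments_py (segments : List (List Int)) (min_segment_size : Int) (out : List (List Int)) : Prop := out = merge_tiny_segments_py_alt segments min_segment_size
instance (segments : List (List Int)) (min_segment_size : Int) (out : List (List Int)) : Decidable (Spec_merge_tiny_segments_py segments min_segment_size out) := by unfold Spec_merge_tiny_segments_py; infer_instance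

-- ===== CLAIM (what is proved, stated in full; the proofs are below) =====
def Claim_equal_merge_tiny_segments_py : Prop := ∀ (segments : List (List Int)) (min_segment_size : Int), Dom_merge_tiny_segments_py segments min_segment_size → Spec_merge_tiny_segments_py segments min_segment_size (merge_tiny_segments_py segments min_segment_size)

-- ===== LEMMAS AND PROOFS =====

-- recursive characterisation of A's loop: cur is merged[-1], done the finished groups before it
def goA (min_segment_size : Int) : List Int → List (List Int) → List (List Int)
  | cur, [] => [cur]
  | cur, t :: rest =>
      if (t.length : Int) < min_segment_size then goA min_segment_size (cur ++ t) rest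
      else cur :: goA min_segment_size t rest

theorem foldlA_eq_goA (min : Int) (rest : List (List Int)) :
    ∀ (done : List (List Int)) (cur : List Int),
      rest.foldl (pvStepA min) (done ++ [cur]) = done ++ goA min cur rest := by
  induction rest with
  | nil => intro done cur; simp [goA]
  | cons t rest ih =>
      intro done cur
      by_cases h : (t.length : Int) < min
      · have hstep : pvStepA min (done ++ [cur]) t = done ++ [cur ++ t] := by
          simp [pvStepA, h]
        simp only [List.foldl_cons, hstep, ih done (cur ++ t), goA, if_pos h]
      · have hstep : pvStepA min (done ++ [cur]) t = (done ++ [cur]) ++ [t] := by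
          simp [pvStepA, h]
        rw [List.foldl_cons, hstep, ih (done ++ [cur]) t]
        simp [goA, h]

theorem groupsB_cons (min : Int) (s : List Int) (tail : List (List Int)) :
    pvGroupsB min (s :: tail) =
      (s ++ (tail.take (pvTinyRun min tail)).flatMap (fun seg => seg)) ::
        pvGroupsB min (tail.drop (pvTinyRun min tail)) := by
  rw [pvGroupsB.eq_def]
  simp [Nat.add_comm 1 (pvTinyRun min tail)]

theorem goA_eq_groups (min : Int) (rest : List (List Int)) :
    ∀ (cur : List Int),
      goA min cur rest =
        (cur ++ (rest.take (pvTinyRun min rest)).flatMap (fun seg => seg)) ::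
          pvGroupsB min (rest.drop (pvTinyRun min rest)) := by
  induction rest with
  | nil => intro cur; simp [goA, pvTinyRun, pvGroupsB]
  | cons t rest ih =>
      intro cur
      by_cases h : (t.length : Int) < min
      · simp only [goA, if_pos h, pvTinyRun, ih (cur ++ t), List.take_succ_cons,
          List.drop_succ_cons, List.flatMap_cons, List.append_assoc]
      · simp only [goA, if_neg h, pvTinyRun, if_neg h, List.take_zero, List.drop_zero,
          List.flatMap_nil, List.append_nil, ih t]
        rw [groupsB_cons]

theorem foldlA_eq_groupsB (min : Int) (s : List Int) (tail : List (List Int)) :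
    (s :: tail).foldl (pvStepA min) [] = pvGroupsB min (s :: tail) := by
  have h0 : pvStepA min [] s = [s] := by simp [pvStepA]
  have h1 : ([] : List (List Int)) ++ [s] = [s] := rfl
  calc (s :: tail).foldl (pvStepA min) []
      = tail.foldl (pvStepA min) (([] : List (List Int)) ++ [s]) := by
        simp [List.foldl_cons, h0]
    _ = [] ++ goA min s tail := foldlA_eq_goA min tail [] s
    _ = pvGroupsB min (s :: tail) := by
        rw [List.nil_append, goA_eq_groups, groupsB_cons]

-- ===== VERDICT (by name: the statement is the Claim_ definition above) =====
theorem merge_tiny_segments_py_spec : Claim_equal_merge_tiny_segments_py := by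
  intro segments min _
  unfold Spec_merge_tiny_segments_py merge_tiny_segments_py merge_tiny_segments_py_alt
  by_cases hlen : segments.length ≤ 1
  · simp [hlen]
  · cases segments with
    | nil => simp at hlen
    | cons s tail =>
        simp only [if_neg hlen, foldlA_eq_groupsB]
        cases pvGroupsB min (s :: tail) with
        | nil => simp
        | cons g0 t =>
            cases t with
            | nil => simp
            | cons g1 rest => by_cases hg : (g0.length : Int) < min <;> simp [hg]
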